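-- pv_equiv track=rewrite | github.com/mo-eng1/clothing-store-sales-automation | 20010011519.py | dosyaIsleme
-- ===== SOURCE A (Python) =====
-- def dosyaIsleme(lines, siparisler=None):
--     if siparisler is None:
--         siparisler = {}
--
--     if not lines:
--         return siparisler
--
--     line = lines.pop(0)
--     eleman = line.split(" ")
--     key, value = eleman[0], eleman[1:]
--     siparisler[key] = value
--
--     return dosyaIsleme(lines, siparisler)
-- ===== SOURCE B (Python) =====
-- def dosyaIsleme(lines, siparisler=None):
--     if siparisler is None:
--         siparisler = {}
--     while lines:
--         line = lines.pop(0)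
--         eleman = line.split(" ")
--         siparisler[eleman[0]] = eleman[1:]
--     return siparisler
-- ===== Notes on version B (the rewrite author's own statement) =====
-- stated objective: simpler
-- what changed: Replaced A's tail recursion (one Python call frame per line, re-checking the None default each call) by a single iterative while-pop loop over the same dict; same mutation of lines, same return value.
import Mathlib
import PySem

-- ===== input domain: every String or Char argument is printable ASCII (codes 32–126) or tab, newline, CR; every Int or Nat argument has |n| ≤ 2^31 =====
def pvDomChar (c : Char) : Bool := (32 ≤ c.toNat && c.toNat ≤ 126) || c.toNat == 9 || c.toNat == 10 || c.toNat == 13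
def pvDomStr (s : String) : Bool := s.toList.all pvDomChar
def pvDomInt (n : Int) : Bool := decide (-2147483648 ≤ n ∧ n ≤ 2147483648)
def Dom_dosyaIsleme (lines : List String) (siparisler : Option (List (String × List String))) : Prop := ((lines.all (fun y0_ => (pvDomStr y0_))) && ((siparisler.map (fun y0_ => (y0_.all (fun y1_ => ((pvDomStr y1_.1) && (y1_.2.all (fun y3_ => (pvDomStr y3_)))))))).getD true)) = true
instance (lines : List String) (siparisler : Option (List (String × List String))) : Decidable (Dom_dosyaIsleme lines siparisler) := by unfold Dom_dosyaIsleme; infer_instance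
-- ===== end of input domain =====

-- B replaces A's tail recursion with one iterative while-pop loop over the same dict (simpler);
-- both A and B empty the `lines` list in place in Python — the equivalence proved here is about the return value.
-- ===== PORT A =====
-- A's tail recursion, after the first call's None-default, always carries a dict; ported as
-- structural recursion on `lines` over a PySem.Dict.
def dosyaIslemeGo (lines : List String) (d : PySem.Dict String (List String)) : PySem.Dict String (List String) :=
  match lines with
  | [] => d
  | line :: rest =>
      let eleman := (PySem.Str.split? line " ").getD []
      dosyaIslemeGo rest (d.insert (eleman.headD "") eleman.tail)

def dosyaIsleme (lines : List String) (siparisler : Option (List (String × List String))) : List (String × List String) :=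
  (dosyaIslemeGo lines (PySem.Dict.ofList (siparisler.getD []))).items

-- ===== PORT B =====
-- B's while-pop loop = a left fold over the lines, updating the dict in place.
def dosyaIsleme_alt (lines : List String) (siparisler : Option (List (String × List String))) : List (String × List String) :=
  (lines.foldl
      (fun d line =>
        let eleman := (PySem.Str.split? line " ").getD []
        d.insert (eleman.headD "") eleman.tail)
      (PySem.Dict.ofList (siparisler.getD []))).items

-- ===== PRECONDITION & SPEC =====
def Spec_dosyaIsleme (lines : List String) (siparisler : Option (List (String × List String))) (out : List (String × List String)) : Prop := out = dosyaIsleme_alt lines siparisler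
instance (lines : List String) (siparisler : Option (List (String × List String))) (out : List (String × List String)) : Decidable (Spec_dosyaIsleme lines siparisler out) := by unfold Spec_dosyaIsleme; infer_instance

-- ===== CLAIM (what is proved, stated in full; the proofs are below) =====
def Claim_equal_dosyaIsleme : Prop := ∀ (lines : List String) (siparisler : Option (List (String × List String))), Dom_dosyaIsleme lines siparisler → Spec_dosyaIsleme lines siparisler (dosyaIsleme lines siparisler)

-- ===== LEMMAS AND PROOFS =====

lemma dosyaIslemeGo_eq_foldl (lines : List String) (d : PySem.Dict String (List String)) :
    dosyaIslemeGo lines d =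
      lines.foldl
        (fun d line =>
          let eleman := (PySem.Str.split? line " ").getD []
          d.insert (eleman.headD "") eleman.tail) d := by
  induction lines generalizing d with
  | nil => rfl
  | cons line rest ih => simp [dosyaIslemeGo, List.foldl, ih]

-- ===== VERDICT (by name: the statement is the Claim_ definition above) =====
theorem dosyaIsleme_spec : Claim_equal_dosyaIsleme := by
  intro lines siparisler _
  unfold Spec_dosyaIsleme dosyaIsleme dosyaIsleme_alt
  rw [dosyaIslemeGo_eq_foldl]
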